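-- pv_equiv track=rewrite | github.com/lfy79001/TableQAKit | TableQAKit/numerical/Pointer/reg_hnt/reghnt/model_functions.py | get_continuous_tag_slots
-- ===== SOURCE A (Python) =====
-- def get_continuous_tag_slots(paragraph_token_tag_prediction):
--     tag_slots = []
--     span_start = False
--     for i in range(0, len(paragraph_token_tag_prediction)):
--         if paragraph_token_tag_prediction[i] != 0 and not span_start:
--             span_start = True
--             start_index = i
--         if paragraph_token_tag_prediction[i] == 0 and span_start:
--             span_start = False
--             tag_slots.append((start_index, i))
--     if span_start:
--         tag_slots.append((start_index, len(paragraph_token_tag_prediction)))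
--     return tag_slots
-- ===== SOURCE B (Python) =====
-- from itertools import groupby
--
--
-- def get_continuous_tag_slots(paragraph_token_tag_prediction):
--     tag_slots = []
--     pos = 0
--     for is_nonzero, group in groupby(paragraph_token_tag_prediction,
--                                      key=lambda x: x != 0):
--         run_len = sum(1 for _ in group)
--         if is_nonzero:
--             tag_slots.append((pos, pos + run_len))
--         pos += run_len
--     return tag_slots
-- ===== Notes on version B (the rewrite author's own statement) =====
-- stated objective: idiomatic
-- what changed: Replaces the explicit span_start/start_index state machine (with its trailing open-span fixup) by itertools.groupby over the nonzero/zero key: each nonzero run becomes a span directly from a running position counter, handling the run-reaching-end case uniformly.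
import Mathlib
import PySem

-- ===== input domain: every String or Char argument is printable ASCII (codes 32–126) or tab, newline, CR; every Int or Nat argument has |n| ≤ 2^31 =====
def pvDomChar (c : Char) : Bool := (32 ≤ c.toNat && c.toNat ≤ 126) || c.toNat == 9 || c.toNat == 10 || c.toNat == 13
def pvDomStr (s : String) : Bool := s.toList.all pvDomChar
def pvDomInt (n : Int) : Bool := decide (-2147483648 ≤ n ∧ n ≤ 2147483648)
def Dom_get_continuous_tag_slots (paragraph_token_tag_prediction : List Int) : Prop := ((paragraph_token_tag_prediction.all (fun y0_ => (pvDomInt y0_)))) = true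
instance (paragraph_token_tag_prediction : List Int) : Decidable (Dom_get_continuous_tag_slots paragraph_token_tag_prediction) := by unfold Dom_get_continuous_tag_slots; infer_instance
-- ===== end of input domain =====

-- B replaces A's span_start/start_index state machine by groupby-style run iteration (objective: idiomatic); same O(n) cost.

-- ===== PORT A =====
-- the for-loop over range(len(xs)) with xs[i], as recursion over the list carrying the index i and the same state
def pvLoopA : List Int → Nat → List (Int × Int) → Bool → Int → List (Int × Int) × Bool × Int
  | [], _, tag_slots, span_start, start_index => (tag_slots, span_start, start_index)
  | v :: rest, i, tag_slots, span_start, start_index =>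
    let p1 : Bool × Int := if v ≠ 0 ∧ span_start = false then (true, (i : Int)) else (span_start, start_index)
    let p2 : List (Int × Int) × Bool :=
      if v = 0 ∧ p1.1 = true then (tag_slots ++ [(p1.2, (i : Int))], false) else (tag_slots, p1.1)
    pvLoopA rest (i + 1) p2.1 p2.2 p1.2

def get_continuous_tag_slots (paragraph_token_tag_prediction : List Int) : List (Int × Int) :=
  let st := pvLoopA paragraph_token_tag_prediction 0 [] false 0
  if st.2.1 then st.1 ++ [(st.2.2, (paragraph_token_tag_prediction.length : Int))] else st.1

-- ===== PORT B =====
-- itertools.groupby(xs, key = x ≠ 0) rendered as its runs: (key, run length) pairs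
def pvRunsB : List Int → List (Bool × Nat)
  | [] => []
  | x :: rest =>
    let k : Bool := decide (x ≠ 0)
    (k, (rest.takeWhile (fun y => decide (y ≠ 0) == k)).length + 1) ::
      pvRunsB (rest.dropWhile (fun y => decide (y ≠ 0) == k))
termination_by xs => xs.length
decreasing_by
  simpa using Nat.lt_succ_of_le (List.length_dropWhile_le _ _)

-- the for-loop of Source B over the groups, carrying pos
def pvAltLoop : List (Bool × Nat) → Int → List (Int × Int)
  | [], _ => []
  | (k, L) :: rest, pos =>
    (if k then [(pos, pos + (L : Int))] else []) ++ pvAltLoop rest (pos + (L : Int))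

def get_continuous_tag_slots_alt (paragraph_token_tag_prediction : List Int) : List (Int × Int) :=
  pvAltLoop (pvRunsB paragraph_token_tag_prediction) 0

-- ===== PRECONDITION & SPEC =====
def Spec_get_continuous_tag_slots (paragraph_token_tag_prediction : List Int) (out : List (Int × Int)) : Prop := out = get_continuous_tag_slots_alt paragraph_token_tag_prediction
instance (paragraph_token_tag_prediction : List Int) (out : List (Int × Int)) : Decidable (Spec_get_continuous_tag_slots paragraph_token_tag_prediction out) := by unfold Spec_get_continuous_tag_slots; infer_instance

-- ===== CLAIM (what is proved, stated in full; the proofs are below) =====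
def Claim_equal_get_continuous_tag_slots : Prop := ∀ (paragraph_token_tag_prediction : List Int), Dom_get_continuous_tag_slots paragraph_token_tag_prediction → Spec_get_continuous_tag_slots paragraph_token_tag_prediction (get_continuous_tag_slots paragraph_token_tag_prediction)

-- ===== LEMMAS AND PROOFS =====

-- reference semantics: S = scanning outside a span at position p, T = inside a span started at s
mutual
def pvS : List Int → Int → List (Int × Int)
  | [], _ => []
  | x :: r, p => if x = 0 then pvS r (p + 1) else pvT r (p + 1) p
def pvT : List Int → Int → Int → List (Int × Int)
  | [], p, s => [(s, p)]
  | x :: r, p, s => if x = 0 then (s, p) :: pvS r (p + 1) else pvT r (p + 1) s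
end

def pvFin (n : Int) (st : List (Int × Int) × Bool × Int) : List (Int × Int) :=
  if st.2.1 then st.1 ++ [(st.2.2, n)] else st.1

lemma pvLoopA_ST (xs : List Int) :
    (∀ (i : Nat) ts si, pvFin ((i + xs.length : Nat) : Int) (pvLoopA xs i ts false si) = ts ++ pvS xs (i : Int))
    ∧ (∀ (i : Nat) ts s, pvFin ((i + xs.length : Nat) : Int) (pvLoopA xs i ts true s) = ts ++ pvT xs (i : Int) s) := by
  induction xs with
  | nil =>
    constructor
    · intro i ts si; simp [pvLoopA, pvFin, pvS]
    · intro i ts s; simp [pvLoopA, pvFin, pvT]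
  | cons v rest ih =>
    obtain ⟨ihS, ihT⟩ := ih
    constructor
    · intro i ts si
      by_cases hv : v = 0
      · have h := ihS (i + 1) ts si
        simp [pvLoopA, hv, pvS]
        simpa [Nat.add_comm, Nat.add_assoc, Nat.add_left_comm, Int.add_comm] using h
      · have h := ihT (i + 1) ts (i : Int)
        simp [pvLoopA, hv, pvS]
        simpa [Nat.add_comm, Nat.add_assoc, Nat.add_left_comm, Int.add_comm] using h
    · intro i ts s
      by_cases hv : v = 0
      · have h := ihS (i + 1) (ts ++ [(s, (i : Int))]) s
        simp [pvLoopA, hv, pvT]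
        simpa [Nat.add_comm, Nat.add_assoc, Nat.add_left_comm, Int.add_comm] using h
      · have h := ihT (i + 1) ts s
        simp [pvLoopA, hv, pvT]
        simpa [Nat.add_comm, Nat.add_assoc, Nat.add_left_comm, Int.add_comm] using h

lemma pvA_eq_S (xs : List Int) : get_continuous_tag_slots xs = pvS xs 0 := by
  have h := (pvLoopA_ST xs).1 0 [] 0
  simpa [get_continuous_tag_slots, pvFin] using h

-- skipping a zero run on the S side
lemma pvS_zeros : ∀ (pref : List Int), (∀ y ∈ pref, y = 0) →
    ∀ (r : List Int) (p : Int), pvS (pref ++ r) p = pvS r (p + pref.length) := by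
  intro pref
  induction pref with
  | nil => intro _ r p; simp
  | cons z zs ih =>
    intro h r p
    have hz : z = 0 := h z (by simp)
    have := ih (fun y hy => h y (by simp [hy])) r (p + 1)
    simp [hz, pvS, this]
    ring_nf

-- crossing a nonzero run on the T side
lemma pvT_nz : ∀ (pref : List Int), (∀ y ∈ pref, y ≠ 0) →
    ∀ (r : List Int) (p s : Int), pvT (pref ++ r) p s = pvT r (p + pref.length) s := by
  intro pref
  induction pref with
  | nil => intro _ r p s; simp
  | cons z zs ih =>
    intro h r p s
    have hz : z ≠ 0 := h z (by simp)
    have := ih (fun y hy => h y (by simp [hy])) r (p + 1) s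
    simp [hz, pvT, this]
    ring_nf

-- closing an open span when the rest starts with 0 (or is empty)
lemma pvT_break : ∀ (r : List Int), (∀ y, r.head? = some y → y = 0) →
    ∀ (q s : Int), pvT r q s = (s, q) :: pvS r q := by
  intro r h q s
  cases r with
  | nil => simp [pvT, pvS]
  | cons y r' =>
    have hy : y = 0 := h y (by simp)
    simp [hy, pvT, pvS]

lemma pvAltLoop_runsB : ∀ (n : Nat) (xs : List Int), xs.length = n →
    ∀ (p : Int), pvAltLoop (pvRunsB xs) p = pvS xs p := by
  intro n
  induction n using Nat.strong_induction_on with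
  | _ n ih =>
    intro xs hlen p
    cases xs with
    | nil => simp [pvRunsB, pvAltLoop, pvS]
    | cons x rest =>
      simp only [List.length_cons] at hlen
      by_cases hx : x = 0
      · -- zero run
        have hdrop : (rest.dropWhile (fun y => decide (y ≠ 0) == false)).length < n := by
          have := List.length_dropWhile_le (fun y => decide (y ≠ 0) == false) rest
          omega
        have hrec := ih _ hdrop _ rfl
          (p + ((rest.takeWhile (fun y => decide (y ≠ 0) == false)).length : Int) + 1)
        have hzeros : ∀ y ∈ x :: rest.takeWhile (fun y => decide (y ≠ 0) == false), y = 0 := by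
          intro y hy
          rcases List.mem_cons.mp hy with h | h
          · exact h ▸ hx
          · simpa using List.mem_takeWhile_imp h
        have hsplit := List.takeWhile_append_dropWhile (p := fun y => decide (y ≠ 0) == false) (l := rest)
        have hS : pvS (x :: rest) p =
            pvS (rest.dropWhile (fun y => decide (y ≠ 0) == false))
              (p + ((rest.takeWhile (fun y => decide (y ≠ 0) == false)).length : Int) + 1) := by
          conv_lhs => rw [← hsplit]
          rw [show (x :: (rest.takeWhile (fun y => decide (y ≠ 0) == false) ++
                rest.dropWhile (fun y => decide (y ≠ 0) == false))) =
              ((x :: rest.takeWhile (fun y => decide (y ≠ 0) == false)) ++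
                rest.dropWhile (fun y => decide (y ≠ 0) == false)) from rfl]
          rw [pvS_zeros _ hzeros]
          congr 1
          simp [List.length_cons]
          ring
        have hA : pvAltLoop (pvRunsB (x :: rest)) p =
            pvAltLoop (pvRunsB (rest.dropWhile (fun y => decide (y ≠ 0) == false)))
              (p + ((rest.takeWhile (fun y => decide (y ≠ 0) == false)).length : Int) + 1) := by
          rw [pvRunsB]
          simp only [hx, decide_not]
          simp [pvAltLoop]
          congr 1
          ring
        rw [hA, hrec, hS]
      · -- nonzero run
        have hdrop : (rest.dropWhile (fun y => decide (y ≠ 0) == true)).length < n := by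
          have := List.length_dropWhile_le (fun y => decide (y ≠ 0) == true) rest
          omega
        have hrec := ih _ hdrop _ rfl
          (p + ((rest.takeWhile (fun y => decide (y ≠ 0) == true)).length : Int) + 1)
        have hnz : ∀ y ∈ rest.takeWhile (fun y => decide (y ≠ 0) == true), y ≠ 0 := by
          intro y hy
          simpa using List.mem_takeWhile_imp hy
        have hhead : ∀ y, (rest.dropWhile (fun y => decide (y ≠ 0) == true)).head? = some y → y = 0 := by
          intro y hy
          have h := List.head?_dropWhile_not (fun y => decide (y ≠ 0) == true) rest
          rw [hy] at h
          simpa using h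
        have hsplit := List.takeWhile_append_dropWhile (p := fun y => decide (y ≠ 0) == true) (l := rest)
        have hS : pvS (x :: rest) p =
            (p, p + ((rest.takeWhile (fun y => decide (y ≠ 0) == true)).length : Int) + 1) ::
              pvS (rest.dropWhile (fun y => decide (y ≠ 0) == true))
                (p + ((rest.takeWhile (fun y => decide (y ≠ 0) == true)).length : Int) + 1) := by
          rw [show pvS (x :: rest) p = pvT rest (p + 1) p by simp [pvS, hx]]
          conv_lhs => rw [← hsplit]
          rw [pvT_nz _ hnz]
          rw [pvT_break _ hhead]
          ring_nf
        have hA : pvAltLoop (pvRunsB (x :: rest)) p =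
            (p, p + ((rest.takeWhile (fun y => decide (y ≠ 0) == true)).length : Int) + 1) ::
              pvAltLoop (pvRunsB (rest.dropWhile (fun y => decide (y ≠ 0) == true)))
                (p + ((rest.takeWhile (fun y => decide (y ≠ 0) == true)).length : Int) + 1) := by
          rw [pvRunsB]
          simp only [decide_not]
          simp [pvAltLoop, hx]
          ring_nf
          exact ⟨trivial, trivial⟩
        rw [hA, hrec, hS]

-- ===== VERDICT (by name: the statement is the Claim_ definition above) =====
theorem get_continuous_tag_slots_spec : Claim_equal_get_continuous_tag_slots := by
  intro xs _
  unfold Spec_get_continuous_tag_slots get_continuous_tag_slots_alt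
  rw [pvA_eq_S, pvAltLoop_runsB xs.length xs rfl]
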